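-- pv_equiv track=rewrite | github.com/FlorianStrobl/mcDB | Backend/GenData.py | searchForFirstDoublePair
-- ===== SOURCE A (Python) =====
-- def searchForFirstDoublePair(arr1: list, arr2: list) -> int:
--     arr = list(zip(arr1, arr2))  # combine the two lists into a list of tuples
--     theSet = set([])
--     for i in range(len(arr)):
--         oldLen = len(theSet)
--         theSet.add(arr[i])
--         # keep adding the next element to the set and check if it got replaced
--         if oldLen + 1 != len(theSet):
--             return i
--     return -1
-- ===== SOURCE B (Python) =====
-- def searchForFirstDoublePair(arr1: list, arr2: list) -> int:
--     # Sort-then-scan: order the enumerated pairs lexicographically by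
--     # (pair, index); equal pairs become adjacent, so one adjacent scan
--     # collects every index whose pair occurred earlier; return the
--     # smallest such index (or -1).
--     order = sorted(enumerate(zip(arr1, arr2)), key=lambda t: (t[1][0], t[1][1], t[0]))
--     best = -1
--     for (i, p), (j, q) in zip(order, order[1:]):
--         if p == q and (best == -1 or j < best):
--             best = j
--     return best
-- ===== Notes on version B (the rewrite author's own statement) =====
-- stated objective: alternative
-- what changed: Replaces A's single hash-set pass (watching the set's length and returning early) with sort-then-scan: sort the enumerated zipped pairs lexicographically by (pair, index), then one adjacent scan keeps the least index whose sorted predecessor carries an equal pair, returning it (or -1).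
import Mathlib
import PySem

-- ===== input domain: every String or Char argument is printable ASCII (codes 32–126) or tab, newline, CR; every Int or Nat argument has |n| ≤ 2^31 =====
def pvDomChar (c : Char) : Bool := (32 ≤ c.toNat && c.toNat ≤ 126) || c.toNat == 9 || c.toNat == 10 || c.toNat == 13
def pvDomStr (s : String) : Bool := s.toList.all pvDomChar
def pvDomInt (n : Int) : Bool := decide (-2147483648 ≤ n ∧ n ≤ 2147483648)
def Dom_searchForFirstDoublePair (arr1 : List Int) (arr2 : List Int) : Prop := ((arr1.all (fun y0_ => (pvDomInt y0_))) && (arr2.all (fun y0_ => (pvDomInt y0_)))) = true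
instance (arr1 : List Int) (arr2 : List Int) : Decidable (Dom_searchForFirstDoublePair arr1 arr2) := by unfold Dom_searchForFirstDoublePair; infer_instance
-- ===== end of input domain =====

-- B replaces A's hash-set early-return pass by sort-then-scan: sort the enumerated
-- pairs lexicographically by (pair, index), then one adjacent scan keeps the least
-- index whose predecessor holds an equal pair (alternative algorithm, not faster).

-- ===== PORT A =====
-- the loop 'for i in range(len(arr)):' watching the set's length, with early return
def pvALoop : List (Int × Int) → PySem.Set (Int × Int) → Int → Int
  | [], _, _ => -1
  | p :: rest, theSet, i =>
    let oldLen := PySem.Set.len theSet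
    let theSet' := PySem.Set.add theSet p
    if oldLen + 1 ≠ PySem.Set.len theSet' then i else pvALoop rest theSet' (i + 1)

def searchForFirstDoublePair (arr1 : List Int) (arr2 : List Int) : Int :=
  pvALoop (arr1.zip arr2) PySem.Set.empty 0

-- ===== PORT B =====
-- key=lambda t: (t[1][0], t[1][1], t[0])  (Python tuple order = lexicographic)
def pvKey (t : Int × (Int × Int)) : Lex (Int × Lex (Int × Int)) :=
  toLex (t.2.1, toLex (t.2.2, t.1))

-- the scan 'for (i, p), (j, q) in zip(order, order[1:]):' of Source B, carrying best
def pvBScan : Int → List (Int × (Int × Int)) → Int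
  | best, (_, p) :: (j, q) :: rest =>
      pvBScan (if p = q ∧ (best = -1 ∨ j < best) then j else best) ((j, q) :: rest)
  | best, _ => best

def searchForFirstDoublePair_alt (arr1 : List Int) (arr2 : List Int) : Int :=
  let order := PySem.List.sorted (PySem.List.enumerate (arr1.zip arr2)) pvKey
  pvBScan (-1) order

-- ===== PRECONDITION & SPEC =====
def Spec_searchForFirstDoublePair (arr1 : List Int) (arr2 : List Int) (out : Int) : Prop := out = searchForFirstDoublePair_alt arr1 arr2
instance (arr1 : List Int) (arr2 : List Int) (out : Int) : Decidable (Spec_searchForFirstDoublePair arr1 arr2 out) := by unfold Spec_searchForFirstDoublePair; infer_instance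

-- ===== CLAIM (what is proved, stated in full; the proofs are below) =====
def Claim_equal_searchForFirstDoublePair : Prop := ∀ (arr1 : List Int) (arr2 : List Int), Dom_searchForFirstDoublePair arr1 arr2 → Spec_searchForFirstDoublePair arr1 arr2 (searchForFirstDoublePair arr1 arr2)

-- ===== LEMMAS AND PROOFS =====

-- 'j is the index of a pair that already occurred at a smaller index'
def PDup (pairs : List (Int × Int)) (j : Int) : Prop :=
  ∃ (k1 k2 : Nat) (h1 : k1 < pairs.length) (h2 : k2 < pairs.length),
    k1 < k2 ∧ pairs[k1] = pairs[k2] ∧ j = (k2 : Int)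

-- proof-side restatement of A's loop: membership in the list of already-seen pairs
def fd : List (Int × Int) → List (Int × Int) → Int → Int
  | _, [], _ => -1
  | seen, p :: rest, i => if p ∈ seen then i else fd (seen ++ [p]) rest (i + 1)

theorem pvALoop_eq_fd (ps : List (Int × Int)) (s : PySem.Set (Int × Int)) (i : Int) :
    pvALoop ps s i = fd s ps i := by
  induction ps generalizing s i with
  | nil => rfl
  | cons p rest ih =>
    by_cases hp : p ∈ s
    · simp only [pvALoop, fd, PySem.Set.add_of_mem hp, hp, if_true]
      rw [if_pos (by omega)]
    · simp only [pvALoop, fd, PySem.Set.add_of_not_mem hp, hp, if_false]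
      rw [if_neg (by simp [PySem.Set.len]), ih]

theorem fd_none (ps seen : List (Int × Int)) (i : Int)
    (h : ∀ (k : Nat) (hk : k < ps.length), ps[k] ∉ seen ++ ps.take k) :
    fd seen ps i = -1 := by
  induction ps generalizing seen i with
  | nil => rfl
  | cons p rest ih =>
    have h0 : p ∉ seen := by have := h 0 (by simp); simpa using this
    simp only [fd, h0, if_false]
    apply ih
    intro k hk
    have := h (k + 1) (by simpa using Nat.succ_lt_succ hk)
    simpa [List.append_assoc] using this

theorem fd_min (ps seen : List (Int × Int)) (i : Int) (k : Nat)
    (hk : k < ps.length) (hmem : ps[k] ∈ seen ++ ps.take k)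
    (hlt : ∀ (k' : Nat) (h' : k' < k), k' < ps.length → ps[k']'(by omega) ∉ seen ++ ps.take k') :
    fd seen ps i = i + (k : Int) := by
  induction ps generalizing seen i k with
  | nil => simp at hk
  | cons p rest ih =>
    cases k with
    | zero =>
      simp only [List.take_zero, List.append_nil, List.getElem_cons_zero] at hmem
      simp [fd, hmem]
    | succ k' =>
      have h0 : p ∉ seen := by
        have := hlt 0 (Nat.succ_pos _) (by simp)
        simpa using this
      simp only [fd, h0, if_false]
      rw [ih (seen ++ [p]) (i + 1) k' (by simpa using Nat.lt_of_succ_lt_succ hk)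
        (by simpa [List.append_assoc] using hmem)
        (by
          intro m hm hml
          have := hlt (m + 1) (Nat.succ_lt_succ hm) (by simpa using Nat.succ_lt_succ hml)
          simpa [List.append_assoc] using this)]
      push_cast
      ring

-- the adjacent-equal second indices of Source B's scan, as a list
def adjDups : List (Int × (Int × Int)) → List Int
  | (_, p) :: (j, q) :: rest => (if p = q then [j] else []) ++ adjDups ((j, q) :: rest)
  | _ => []

theorem pvBScan_eq_foldl (ls : List (Int × (Int × Int))) (best : Int) :
    pvBScan best ls =
      (adjDups ls).foldl (fun b j => if b = -1 ∨ j < b then j else b) best := by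
  induction ls generalizing best with
  | nil => rfl
  | cons x rest ih =>
    match rest with
    | [] => rfl
    | (j, q) :: rest' =>
      obtain ⟨i, p⟩ := x
      by_cases hpq : p = q
      · simp only [pvBScan, adjDups, hpq, if_true, List.singleton_append, List.foldl_cons, ih]
        congr 1
        by_cases hb : best = -1 ∨ j < best
        · simp [hb]
        · simp [hb]
      · simp only [pvBScan, adjDups, hpq, if_false, List.nil_append, ih]
        congr 1

theorem mem_adjDups_iff (ls : List (Int × (Int × Int))) (j : Int) :
    j ∈ adjDups ls ↔
      ∃ (m : Nat) (h : m + 1 < ls.length), (ls[m]'(by omega)).2 = ls[m+1].2 ∧ j = (ls[m+1]).1 := by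
  induction ls with
  | nil => simp [adjDups]
  | cons x rest ih =>
    match rest with
    | [] =>
      simp [adjDups]
    | (j', q) :: rest' =>
      obtain ⟨i, p⟩ := x
      constructor
      · intro hj
        simp only [adjDups] at hj
        rcases List.mem_append.mp hj with h1 | h2
        · by_cases hpq : p = q
          · simp only [hpq, if_true, List.mem_singleton] at h1
            exact ⟨0, by simp, by simp [hpq], by simp [h1]⟩
          · simp [hpq] at h1
        · obtain ⟨m, hm, heq, hjj⟩ := (ih).mp h2
          exact ⟨m + 1, by simpa using Nat.succ_lt_succ hm, by simpa using heq, by simpa using hjj⟩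
      · rintro ⟨m, hm, heq, hjj⟩
        simp only [adjDups, List.mem_append]
        cases m with
        | zero =>
          left
          simp only [List.getElem_cons_zero, List.getElem_cons_succ] at heq hjj
          have : p = q := by simpa using heq
          simp [this, hjj]
        | succ m' =>
          right
          exact (ih).mpr ⟨m', by simpa using Nat.lt_of_succ_lt_succ hm,
            by simpa using heq, by simpa using hjj⟩

-- the running-min loop is foldl min once the accumulator is a real index
theorem foldl_step_eq_min (t : List Int) (x : Int) (hx : 0 ≤ x) (ht : ∀ j ∈ t, 0 ≤ j) :
    t.foldl (fun b j => if b = -1 ∨ j < b then j else b) x = t.foldl min x := by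
  induction t generalizing x with
  | nil => rfl
  | cons y t ih =>
    have hy0 : 0 ≤ y := ht y (by simp)
    simp only [List.foldl_cons]
    by_cases hy : y < x
    · rw [if_pos (Or.inr hy), min_eq_right (le_of_lt hy)]
      exact ih y hy0 (fun j hj => ht j (by simp [hj]))
    · rw [if_neg (by omega), min_eq_left (by omega)]
      exact ih x hx (fun j hj => ht j (by simp [hj]))

theorem pvKey_le_iff (s t : Int × (Int × Int)) :
    pvKey s ≤ pvKey t ↔
      s.2.1 < t.2.1 ∨ (s.2.1 = t.2.1 ∧ (s.2.2 < t.2.2 ∨ (s.2.2 = t.2.2 ∧ s.1 ≤ t.1))) := by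
  simp [pvKey, Prod.Lex.le_iff]

theorem pvKey_lt_iff (s t : Int × (Int × Int)) :
    pvKey s < pvKey t ↔
      s.2.1 < t.2.1 ∨ (s.2.1 = t.2.1 ∧ (s.2.2 < t.2.2 ∨ (s.2.2 = t.2.2 ∧ s.1 < t.1))) := by
  simp [pvKey, Prod.Lex.lt_iff]

-- every element of the sorted enumeration is (k, pairs[k])
theorem mem_sorted_enum (pairs : List (Int × Int)) (t : Int × (Int × Int))
    (ht : t ∈ PySem.List.sorted (PySem.List.enumerate pairs) pvKey) :
    ∃ (k : Nat) (h : k < pairs.length), t = ((k : Int), pairs[k]) := by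
  have := (PySem.List.sorted_perm (PySem.List.enumerate pairs) pvKey false).mem_iff.mp ht
  obtain ⟨k, hk, hek⟩ := (PySem.List.mem_enumerate_iff pairs 0 t).mp this
  exact ⟨k, hk, by simpa using hek⟩

-- first components of the sorted enumeration are pairwise distinct
theorem nodup_fst_sorted_enum (pairs : List (Int × Int)) :
    ((PySem.List.sorted (PySem.List.enumerate pairs) pvKey).map Prod.fst).Nodup := by
  have hperm := (PySem.List.sorted_perm (PySem.List.enumerate pairs) pvKey false).map Prod.fst
  rw [hperm.nodup_iff]
  have hpw := PySem.List.pairwise_lt_enumerate pairs 0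
  have : ((PySem.List.enumerate pairs 0).map Prod.fst).Pairwise (· < ·) := by
    rw [List.pairwise_map]
    exact hpw
  exact this.nodup

-- an adjacent equal pair in the sorted order names a real duplicate
theorem adj_sound (pairs : List (Int × Int)) (j : Int)
    (hj : j ∈ adjDups (PySem.List.sorted (PySem.List.enumerate pairs) pvKey)) :
    PDup pairs j := by
  set ys := PySem.List.sorted (PySem.List.enumerate pairs) pvKey with hys
  obtain ⟨m, hm, heq, hjj⟩ := (mem_adjDups_iff ys j).mp hj
  have hkey : pvKey (ys[m]'(by omega)) ≤ pvKey ys[m+1] :=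
    PySem.List.key_sorted_getElem_mono (PySem.List.enumerate pairs) pvKey (Nat.le_succ m) hm
  have hne : (ys[m]'(by omega)).1 ≠ (ys[m+1]).1 := by
    intro h
    have hnd := nodup_fst_sorted_enum pairs
    have h1 : ((ys.map Prod.fst)[m]'(by simpa using by omega)) = ((ys.map Prod.fst)[m+1]'(by simpa using hm)) := by
      simpa using h
    have := (List.Nodup.getElem_inj_iff hnd).mp h1
    omega
  have hle : (ys[m]'(by omega)).1 ≤ (ys[m+1]).1 := by
    rcases (pvKey_le_iff _ _).mp hkey with h | ⟨_, h | ⟨_, h⟩⟩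
    · rw [heq] at h; omega
    · rw [heq] at h; omega
    · exact h
  obtain ⟨k1, hk1, he1⟩ := mem_sorted_enum pairs _ (ys.getElem_mem (by omega : m < ys.length))
  obtain ⟨k2, hk2, he2⟩ := mem_sorted_enum pairs _ (ys.getElem_mem hm)
  refine ⟨k1, k2, hk1, hk2, ?_, ?_, ?_⟩
  · have : (k1 : Int) < (k2 : Int) := by
      rw [he1] at hne hle; rw [he2] at hne hle
      simp at hne hle; omega
    exact_mod_cast this
  · rw [he1, he2] at heq; simpa using heq
  · rw [he2] at hjj; simpa using hjj

theorem mem_take_exists (l : List (Int × Int)) (n : Nat) (x : Int × Int) (h : x ∈ l.take n) :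
    ∃ (a : Nat) (ha : a < l.length), a < n ∧ l[a] = x := by
  obtain ⟨a, ha, he⟩ := List.getElem_of_mem h
  rw [List.getElem_take] at he
  refine ⟨a, ?_, ?_, he⟩ <;> simp [List.length_take] at ha <;> omega

theorem getElem_mem_take (l : List (Int × Int)) (n a : Nat) (ha : a < l.length) (h : a < n) :
    l[a] ∈ l.take n := by
  have : (l.take n)[a]'(by simp [List.length_take]; omega) = l[a] := List.getElem_take ..
  rw [← this]; exact List.getElem_mem _

-- every duplicate index appears in the adjacent scan of the sorted order
theorem adj_complete (pairs : List (Int × Int)) (j : Int) (hd : PDup pairs j) :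
    j ∈ adjDups (PySem.List.sorted (PySem.List.enumerate pairs) pvKey) := by
  obtain ⟨k1, k2, h1, h2, hk12, heqp, hjk⟩ := hd
  have hs : ((k1 : Int), pairs[k1]) ∈ PySem.List.sorted (PySem.List.enumerate pairs) pvKey := by
    rw [(PySem.List.sorted_perm _ _ _).mem_iff]
    exact (PySem.List.mem_enumerate_iff pairs 0 _).mpr ⟨k1, h1, by simp⟩
  have ht : ((k2 : Int), pairs[k2]) ∈ PySem.List.sorted (PySem.List.enumerate pairs) pvKey := by
    rw [(PySem.List.sorted_perm _ _ _).mem_iff]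
    exact (PySem.List.mem_enumerate_iff pairs 0 _).mpr ⟨k2, h2, by simp⟩
  obtain ⟨l, hl, hel⟩ := List.getElem_of_mem hs
  obtain ⟨m, hm, hem⟩ := List.getElem_of_mem ht
  have hkeylt : pvKey ((k1 : Int), pairs[k1]) < pvKey ((k2 : Int), pairs[k2]) := by
    rw [pvKey_lt_iff]
    right
    refine ⟨by rw [heqp], Or.inr ⟨by rw [heqp], ?_⟩⟩
    show (k1 : Int) < (k2 : Int)
    exact_mod_cast hk12
  have hlm : l < m := by
    by_contra hc
    have := PySem.List.key_sorted_getElem_mono (PySem.List.enumerate pairs) pvKey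
      (by omega : m ≤ l) hl
    simp only [hel, hem] at this
    exact absurd this (not_le_of_gt hkeylt)
  cases m with
  | zero => omega
  | succ m' =>
    have hm' : m' < (PySem.List.sorted (PySem.List.enumerate pairs) pvKey).length := by omega
    have hA := PySem.List.key_sorted_getElem_mono (PySem.List.enumerate pairs) pvKey
      (by omega : l ≤ m') hm'
    have hB := PySem.List.key_sorted_getElem_mono (PySem.List.enumerate pairs) pvKey
      (by omega : m' ≤ m' + 1) hm
    simp only [hel] at hA
    simp only [hem] at hB
    rw [heqp] at hA
    have hA' := (pvKey_le_iff _ _).mp hA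
    have hB' := (pvKey_le_iff _ _).mp hB
    simp only at hA' hB'
    refine (mem_adjDups_iff _ j).mpr ⟨m', hm, ?_, ?_⟩
    · rw [hem]
      have e1 : ((PySem.List.sorted (PySem.List.enumerate pairs) pvKey)[m']'hm').2.1 = pairs[k2].1 := by omega
      have e2 : ((PySem.List.sorted (PySem.List.enumerate pairs) pvKey)[m']'hm').2.2 = pairs[k2].2 := by omega
      show ((PySem.List.sorted (PySem.List.enumerate pairs) pvKey)[m']'hm').2 = ((k2 : Int), pairs[k2]).2
      exact Prod.ext e1 e2
    · rw [hem]
      exact hjk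

-- nonnegativity of everything in adjDups
theorem adjDups_nonneg (pairs : List (Int × Int)) (j : Int)
    (hj : j ∈ adjDups (PySem.List.sorted (PySem.List.enumerate pairs) pvKey)) : 0 ≤ j := by
  obtain ⟨k1, k2, _, _, _, _, hj2⟩ := adj_sound pairs j hj
  omega

-- ===== VERDICT (by name: the statement is the Claim_ definition above) =====
theorem searchForFirstDoublePair_spec : Claim_equal_searchForFirstDoublePair := by
  intro arr1 arr2 _
  show _ = _
  unfold searchForFirstDoublePair searchForFirstDoublePair_alt
  rw [pvALoop_eq_fd, pvBScan_eq_foldl]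
  cases hS : adjDups (PySem.List.sorted (PySem.List.enumerate (arr1.zip arr2)) pvKey) with
  | nil =>
    rw [List.foldl_nil]
    apply fd_none
    intro k hk hmem
    have hmem' : (arr1.zip arr2)[k] ∈ List.take k (arr1.zip arr2) := hmem
    obtain ⟨a, ha, haltk, haeq⟩ := mem_take_exists _ _ _ hmem'
    have hpd : PDup (arr1.zip arr2) (k : Int) := ⟨a, k, ha, hk, haltk, by rw [haeq], rfl⟩
    have := adj_complete _ _ hpd
    rw [hS] at this
    simp at this
  | cons x t =>
    have hx0 : 0 ≤ x := adjDups_nonneg _ x (by rw [hS]; simp)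
    have ht0 : ∀ j' ∈ t, 0 ≤ j' := fun j' hj' => adjDups_nonneg _ j' (by rw [hS]; simp [hj'])
    rw [List.foldl_cons, if_pos (Or.inl rfl), foldl_step_eq_min t x hx0 ht0]
    have hrmem : t.foldl min x ∈ adjDups (PySem.List.sorted (PySem.List.enumerate (arr1.zip arr2)) pvKey) := by
      rw [hS]
      rcases PySem.List.foldl_min_mem t x with h | h
      · simp [h]
      · simp [h]
    have hrmin : ∀ y ∈ adjDups (PySem.List.sorted (PySem.List.enumerate (arr1.zip arr2)) pvKey),
        t.foldl min x ≤ y := by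
      rw [hS]
      intro y hy
      rcases List.mem_cons.mp hy with h | h
      · rw [h]; exact (PySem.List.foldl_min_le t x).1
      · exact (PySem.List.foldl_min_le t x).2 y h
    obtain ⟨k1, k2, hk1, hk2, hk12, heqp, hjk⟩ := adj_sound _ _ hrmem
    rw [hjk]
    have hstep : fd PySem.Set.empty (arr1.zip arr2) 0 = 0 + (k2 : Int) := by
      apply fd_min _ _ _ k2 hk2
      · show (arr1.zip arr2)[k2] ∈ PySem.Set.empty ++ List.take k2 (arr1.zip arr2)
        show (arr1.zip arr2)[k2] ∈ List.take k2 (arr1.zip arr2)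
        exact heqp ▸ getElem_mem_take _ k2 k1 hk1 hk12
      · intro k' hk' hk'len hmem
        have hmem' : (arr1.zip arr2)[k'] ∈ List.take k' (arr1.zip arr2) := hmem
        obtain ⟨a, ha, haltk, haeq⟩ := mem_take_exists _ _ _ hmem'
        have hpd : PDup (arr1.zip arr2) (k' : Int) := ⟨a, k', ha, hk'len, haltk, by rw [haeq], rfl⟩
        have := hrmin _ (adj_complete _ _ hpd)
        rw [hjk] at this
        have : (k2 : Int) ≤ (k' : Int) := this
        omega
    rw [hstep]
    omega
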